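-- pv_equiv track=rewrite | github.com/totallyjohnny7/evolution-study-guide | _work/diff_braces.py | depth_track
-- ===== SOURCE A (Python) =====
-- def depth_track(s):
--     depth = 0
--     in_str = False
--     sc = None
--     bs = False
--     history = []
--     for j, c in enumerate(s):
--         if bs:
--             bs = False
--             continue
--         if in_str:
--             if c == '\\':
--                 bs = True
--                 continue
--             if c == sc:
--                 in_str = False
--         else:
--             if c in "'\"`":
--                 in_str = True
--                 sc = c
--             elif c == '{':
--                 depth += 1
--                 history.append((j, '+', depth))
--             elif c == '}':
--                 depth -= 1
--                 history.append((j, '-', depth))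
--     return depth, history
-- ===== SOURCE B (Python) =====
-- def _skip_string(s, j, q):
--     n = len(s)
--     while j < n:
--         c = s[j]
--         if c == '\\':
--             j += 2
--         elif c == q:
--             return j + 1
--         else:
--             j += 1
--     return j
--
--
-- def depth_track(s):
--     depth = 0
--     history = []
--     j = 0
--     n = len(s)
--     while j < n:
--         c = s[j]
--         if c in "'\"`":
--             j = _skip_string(s, j + 1, c)
--             continue
--         if c == '{':
--             depth += 1
--             history.append((j, '+', depth))
--         elif c == '}':
--             depth -= 1
--             history.append((j, '-', depth))
--         j += 1
--     return depth, history
-- ===== Notes on version B (the rewrite author's own statement) =====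
-- stated objective: alternative
-- what changed: Replaces the single enumerate loop carrying in_str/sc/bs flags with an index-driven while loop plus a separate _skip_string helper that consumes an entire string literal (jumping 2 past backslash escapes) before control returns to the brace-counting loop; the in_str, sc and bs state variables disappear.
import Mathlib
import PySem

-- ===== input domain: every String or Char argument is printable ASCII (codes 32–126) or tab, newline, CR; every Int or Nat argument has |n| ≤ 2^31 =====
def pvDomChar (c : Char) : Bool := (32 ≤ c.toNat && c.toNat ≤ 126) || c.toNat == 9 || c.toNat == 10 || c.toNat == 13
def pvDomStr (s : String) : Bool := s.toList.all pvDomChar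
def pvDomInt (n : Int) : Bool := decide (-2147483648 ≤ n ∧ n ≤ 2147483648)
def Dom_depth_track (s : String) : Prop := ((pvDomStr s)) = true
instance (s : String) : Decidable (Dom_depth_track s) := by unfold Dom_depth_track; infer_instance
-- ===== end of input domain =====

-- B restructures A's flag-machine (in_str/sc/bs) into an index loop with a separate
-- string-literal skipper; same O(n) cost, objective: alternative decomposition.

-- ===== PORT A =====
-- state: (depth, in_str, sc, bs, history), loop over enumerate(s) as recursion carrying j
def depth_track_loop (l : List Char) (j : Int) (depth : Int) (inStr : Bool)
    (sc : Option Char) (bs : Bool) (hist : List (Int × String × Int)) :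
    Int × (List (Int × String × Int)) :=
  match l with
  | [] => (depth, hist)
  | c :: rest =>
    if bs then
      depth_track_loop rest (j + 1) depth inStr sc false hist
    else if inStr then
      if c == '\\' then
        depth_track_loop rest (j + 1) depth inStr sc true hist
      else if sc == some c then
        depth_track_loop rest (j + 1) depth false sc bs hist
      else
        depth_track_loop rest (j + 1) depth inStr sc bs hist
    else
      if c == '\'' || c == '"' || c == '`' then
        depth_track_loop rest (j + 1) depth true (some c) bs hist
      else if c == '{' then
        depth_track_loop rest (j + 1) (depth + 1) inStr sc bs (hist ++ [(j, "+", depth + 1)])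
      else if c == '}' then
        depth_track_loop rest (j + 1) (depth - 1) inStr sc bs (hist ++ [(j, "-", depth - 1)])
      else
        depth_track_loop rest (j + 1) depth inStr sc bs hist

def depth_track (s : String) : Int × (List (Int × String × Int)) :=
  depth_track_loop s.toList 0 0 false none false []

-- ===== PORT B =====
-- _skip_string: consume the rest of a string literal started by quote q; returns the
-- remaining characters and the index just past the closing quote (while-loop → recursion).
def skip_string (l : List Char) (j : Int) (q : Char) : List Char × Int :=
  match l with
  | [] => ([], j)
  | c :: rest =>
    if c == '\\' then
      match rest with
      | [] => ([], j + 2)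
      | _ :: r2 => skip_string r2 (j + 2) q
    else if c == q then (rest, j + 1)
    else skip_string rest (j + 1) q

theorem skip_string_length_le_fuel : ∀ (n : Nat) (l : List Char), l.length ≤ n →
    ∀ (j : Int) (q : Char), (skip_string l j q).1.length ≤ l.length := by
  intro n
  induction n with
  | zero =>
    intro l hl j q
    have h0 : l = [] := List.eq_nil_of_length_eq_zero (Nat.le_zero.mp hl)
    subst h0; exact Nat.le_refl _
  | succ n ih =>
    intro l hl j q
    match l with
    | [] => exact Nat.le_refl _
    | c :: rest =>
      by_cases h1 : c = '\\'
      · subst h1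
        match rest with
        | [] => simp [skip_string]
        | c2 :: r2 =>
          have h2 : skip_string ('\\' :: c2 :: r2) j q = skip_string r2 (j + 2) q := by
            simp [skip_string]
          rw [h2]
          have h3 := ih r2 (by simp at hl; omega) (j + 2) q
          simp only [List.length_cons]; omega
      · by_cases h2 : c = q
        · subst h2
          have h3 : skip_string (c :: rest) j c = (rest, j + 1) := by
            rw [skip_string.eq_def]; simp [h1]
          rw [h3]
          exact Nat.le_succ _
        · have h3 : skip_string (c :: rest) j q = skip_string rest (j + 1) q := by
            rw [skip_string.eq_def]; simp [h1, h2]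
          rw [h3]
          have h4 := ih rest (by simp at hl; omega) (j + 1) q
          simp only [List.length_cons]; omega

theorem skip_string_length_le (l : List Char) (j : Int) (q : Char) :
    (skip_string l j q).1.length ≤ l.length :=
  skip_string_length_le_fuel l.length l (Nat.le_refl _) j q

def depth_track_alt_loop (l : List Char) (j : Int) (depth : Int)
    (hist : List (Int × String × Int)) : Int × (List (Int × String × Int)) :=
  match l with
  | [] => (depth, hist)
  | c :: rest =>
    if c == '\'' || c == '"' || c == '`' then
      let r := skip_string rest (j + 1) c
      depth_track_alt_loop r.1 r.2 depth hist
    else if c == '{' then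
      depth_track_alt_loop rest (j + 1) (depth + 1) (hist ++ [(j, "+", depth + 1)])
    else if c == '}' then
      depth_track_alt_loop rest (j + 1) (depth - 1) (hist ++ [(j, "-", depth - 1)])
    else
      depth_track_alt_loop rest (j + 1) depth hist
termination_by l.length
decreasing_by
  · simpa using Nat.lt_succ_of_le (skip_string_length_le rest (j + 1) c)
  · simp
  · simp
  · simp

def depth_track_alt (s : String) : Int × (List (Int × String × Int)) :=
  depth_track_alt_loop s.toList 0 0 []

-- ===== PRECONDITION & SPEC =====
def Spec_depth_track (s : String) (out : Int × (List (Int × String × Int))) : Prop := out = depth_track_alt s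
instance (s : String) (out : Int × (List (Int × String × Int))) : Decidable (Spec_depth_track s out) := by unfold Spec_depth_track; infer_instance

-- ===== CLAIM (what is proved, stated in full; the proofs are below) =====
def Claim_equal_depth_track : Prop := ∀ (s : String), Dom_depth_track s → Spec_depth_track s (depth_track s)

-- ===== LEMMAS AND PROOFS =====

-- Inside a string literal (in_str = true, sc = some q, bs = false) A's loop just scans
-- to the end of the literal: it agrees with first running skip_string, then continuing
-- outside the string on what skip_string left over.
theorem aLoop_in_string (n : Nat) (l : List Char) (hn : l.length ≤ n) (j : Int) (q : Char)
    (depth : Int) (hist : List (Int × String × Int)) :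
    depth_track_loop l j depth true (some q) false hist =
      depth_track_loop (skip_string l j q).1 (skip_string l j q).2 depth false (some q) false hist := by
  induction n generalizing l j with
  | zero =>
    have h0 : l = [] := List.eq_nil_of_length_eq_zero (Nat.le_zero.mp hn)
    subst h0; simp [depth_track_loop, skip_string]
  | succ n ih =>
    match l with
    | [] => simp [depth_track_loop, skip_string]
    | c :: rest =>
      by_cases hb : c = '\\'
      · subst hb
        match rest with
        | [] => simp [depth_track_loop, skip_string]
        | c2 :: r2 =>
          have h1 : depth_track_loop ('\\' :: c2 :: r2) j depth true (some q) false hist =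
              depth_track_loop r2 (j + 1 + 1) depth true (some q) false hist := by
            simp [depth_track_loop]
          have h2 : skip_string ('\\' :: c2 :: r2) j q = skip_string r2 (j + 2) q := by
            simp [skip_string]
          rw [h1, h2]
          have h3 : j + 1 + 1 = j + 2 := by ring
          rw [h3]
          exact ih r2 (by simp at hn ⊢; omega) (j + 2)
      · by_cases hq : c = q
        · subst hq
          have h2 : skip_string (c :: rest) j c = (rest, j + 1) := by
            rw [skip_string.eq_def]; simp [hb]
          rw [h2]
          simp [depth_track_loop, hb]
        · have hq' : ¬ q = c := fun h => hq h.symm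
          have h1 : depth_track_loop (c :: rest) j depth true (some q) false hist =
              depth_track_loop rest (j + 1) depth true (some q) false hist := by
            simp [depth_track_loop, hb, hq']
          have h2 : skip_string (c :: rest) j q = skip_string rest (j + 1) q := by
            rw [skip_string.eq_def]; simp [hb, hq]
          rw [h1, h2]
          exact ih rest (by simp at hn ⊢; omega) (j + 1)

-- Outside a string (in_str = false, bs = false) A's loop never reads sc, and agrees
-- step by step with B's loop; string literals are bridged by aLoop_in_string.
theorem aLoop_eq_bLoop (n : Nat) (l : List Char) (hn : l.length ≤ n) (j : Int) (depth : Int)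
    (sc : Option Char) (hist : List (Int × String × Int)) :
    depth_track_loop l j depth false sc false hist = depth_track_alt_loop l j depth hist := by
  induction n generalizing l j depth sc hist with
  | zero =>
    have h0 : l = [] := List.eq_nil_of_length_eq_zero (Nat.le_zero.mp hn)
    subst h0; simp [depth_track_loop, depth_track_alt_loop]
  | succ n ih =>
    match l with
    | [] => simp [depth_track_loop, depth_track_alt_loop]
    | c :: rest =>
      have hlen : rest.length ≤ n := by simp at hn; omega
      by_cases hq : c = '\'' ∨ c = '"' ∨ c = '`'
      · have hqb : (c == '\'' || c == '"' || c == '`') = true := by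
          rcases hq with h | h | h <;> simp [h]
        have h1 : depth_track_loop (c :: rest) j depth false sc false hist =
            depth_track_loop rest (j + 1) depth true (some c) false hist := by
          simp [depth_track_loop, hqb]
        have h2 : depth_track_alt_loop (c :: rest) j depth hist =
            depth_track_alt_loop (skip_string rest (j + 1) c).1 (skip_string rest (j + 1) c).2
              depth hist := by
          rw [depth_track_alt_loop]; simp [hqb]
        rw [h1, h2, aLoop_in_string rest.length rest le_rfl]
        exact ih (skip_string rest (j + 1) c).1
          (Nat.le_trans (skip_string_length_le rest (j + 1) c) hlen) _ _ _ _
      · have hqb : (c == '\'' || c == '"' || c == '`') = false := by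
          simp only [Bool.or_eq_false_iff, beq_eq_false_iff_ne, ne_eq]
          exact ⟨⟨fun h => hq (Or.inl h), fun h => hq (Or.inr (Or.inl h))⟩,
            fun h => hq (Or.inr (Or.inr h))⟩
        by_cases ho : c = '{'
        · subst ho
          have h1 : depth_track_loop ('{' :: rest) j depth false sc false hist =
              depth_track_loop rest (j + 1) (depth + 1) false sc false
                (hist ++ [(j, "+", depth + 1)]) := by
            simp [depth_track_loop]
          have h2 : depth_track_alt_loop ('{' :: rest) j depth hist =
              depth_track_alt_loop rest (j + 1) (depth + 1) (hist ++ [(j, "+", depth + 1)]) := by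
            rw [depth_track_alt_loop]; simp
          rw [h1, h2]; exact ih rest hlen _ _ _ _
        · by_cases hc : c = '}'
          · subst hc
            have h1 : depth_track_loop ('}' :: rest) j depth false sc false hist =
                depth_track_loop rest (j + 1) (depth - 1) false sc false
                  (hist ++ [(j, "-", depth - 1)]) := by
              simp [depth_track_loop]
            have h2 : depth_track_alt_loop ('}' :: rest) j depth hist =
                depth_track_alt_loop rest (j + 1) (depth - 1) (hist ++ [(j, "-", depth - 1)]) := by
              rw [depth_track_alt_loop]; simp
            rw [h1, h2]; exact ih rest hlen _ _ _ _
          · have h1 : depth_track_loop (c :: rest) j depth false sc false hist =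
                depth_track_loop rest (j + 1) depth false sc false hist := by
              simp [depth_track_loop, hqb, ho, hc]
            have h2 : depth_track_alt_loop (c :: rest) j depth hist =
                depth_track_alt_loop rest (j + 1) depth hist := by
              rw [depth_track_alt_loop]; simp [hqb, ho, hc]
            rw [h1, h2]; exact ih rest hlen _ _ _ _

-- ===== VERDICT (by name: the statement is the Claim_ definition above) =====
theorem depth_track_spec : Claim_equal_depth_track := by
  intro s _
  unfold Spec_depth_track depth_track depth_track_alt
  exact aLoop_eq_bLoop s.toList.length s.toList le_rfl 0 0 none []
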